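-- pv_equiv track=rewrite | github.com/pohily/www.hackerrank.com- | getMinimumCost.py | getMinimumCost
-- ===== SOURCE A (Python) =====
-- def getMinimumCost(k, c):
--     cost = sorted(c, reverse=True)
--     sur = 1
--     pay = 0
--     if k >= len(c):
--         return sum(c)
--     else:
--         while cost:
--             pay += sum(sur * cost[:k])
--             cost = cost[k:]
--             sur += 1
--     return pay
-- ===== SOURCE B (Python) =====
-- def getMinimumCost(k, c):
--     s = sorted(c, reverse=True)
--     return sum((i // k + 1) * v for i, v in enumerate(s)) if s else 0
-- ===== Notes on version B (the rewrite author's own statement) =====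
-- stated objective: alternative
-- what changed: Replaces the chunk-by-chunk while loop with repeated list slicing by a single pass over the descending-sorted list, multiplying element i by i//k + 1.
import Mathlib
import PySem

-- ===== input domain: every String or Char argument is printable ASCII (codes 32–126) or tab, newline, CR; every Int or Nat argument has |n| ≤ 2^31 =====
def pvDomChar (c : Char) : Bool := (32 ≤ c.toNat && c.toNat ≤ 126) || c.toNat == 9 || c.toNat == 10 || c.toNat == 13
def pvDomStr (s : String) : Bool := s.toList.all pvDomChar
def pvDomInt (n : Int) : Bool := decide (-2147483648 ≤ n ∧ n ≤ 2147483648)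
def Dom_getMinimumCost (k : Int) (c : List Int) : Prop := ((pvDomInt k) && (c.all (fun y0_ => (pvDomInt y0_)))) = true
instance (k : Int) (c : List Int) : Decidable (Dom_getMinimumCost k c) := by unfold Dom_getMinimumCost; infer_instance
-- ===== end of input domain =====

-- B replaces A's chunked while loop (repeated slicing) by one pass over the sorted list
-- with multiplier i//k + 1 (objective: alternative decomposition, same measured cost).

-- ===== PORT A =====
-- the while loop: fuel = initial list length (each iteration drops ≥ 1 element when 1 ≤ k,
-- the only case Pre_ admits with a nonempty list; Python diverges for k ≤ 0, excluded by Pre_)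
def pvALoop (k : Int) : Nat → Int → Int → List Int → Int
  | 0, _, pay, _ => pay
  | fuel + 1, sur, pay, cost =>
    if cost = [] then pay
    else
      -- pay += sum(sur * cost[:k])  — Python's int*list repetition, summed
      pvALoop k fuel (sur + 1)
        (pay + ((List.replicate sur.toNat (PySem.List.slice cost none (some k))).flatten).sum)
        (PySem.List.slice cost (some k) none)

def getMinimumCost (k : Int) (c : List Int) : Int :=
  let cost := PySem.List.sorted c (fun x => x) true
  if k ≥ (c.length : Int) then c.sum
  else pvALoop k cost.length 1 0 cost

-- ===== PORT B =====
def getMinimumCost_alt (k : Int) (c : List Int) : Int :=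
  let s := PySem.List.sorted c (fun x => x) true
  if s = [] then 0
  else ((PySem.List.enumerate s 0).map
          (fun p => (PySem.Int.floordiv p.1 k + 1) * p.2)).sum

-- ===== PRECONDITION & SPEC =====
-- Pre_ excludes k ≤ 0 with a nonempty list: there Python A never terminates
-- (cost[k:] with k ≤ 0 never shortens the list), so A returns no value.
def Pre_getMinimumCost (k : Int) (c : List Int) : Prop := 1 ≤ k ∨ c = []
instance (k : Int) (c : List Int) : Decidable (Pre_getMinimumCost k c) := by
  unfold Pre_getMinimumCost; infer_instance

def pvWitness_getMinimumCost : Int × List Int := (2, [1, 3, 5, 2])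

def Spec_getMinimumCost (k : Int) (c : List Int) (out : Int) : Prop := out = getMinimumCost_alt k c
instance (k : Int) (c : List Int) (out : Int) : Decidable (Spec_getMinimumCost k c out) := by
  unfold Spec_getMinimumCost; infer_instance

-- ===== CLAIM (what is proved, stated in full; the proofs are below) =====
def Claim_equal_getMinimumCost : Prop := ∀ (k : Int) (c : List Int), Dom_getMinimumCost k c → Pre_getMinimumCost k c → Spec_getMinimumCost k c (getMinimumCost k c)

-- ===== LEMMAS AND PROOFS =====

-- sum(sur * chunk) = sur * sum(chunk)
lemma pv_repSum (n : Nat) (l : List Int) :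
    ((List.replicate n l).flatten).sum = (n : Int) * l.sum := by
  induction n with
  | zero => simp
  | succ m ih => simp [List.replicate_succ, ih]; ring

-- all indices below k: every multiplier i//k + sur is just sur
lemma pv_sumSmall (k sur : Int) (hk : 0 < k) :
    ∀ (xs : List Int) (s : Int), 0 ≤ s → s + xs.length ≤ k →
      ((PySem.List.enumerate xs s).map
        (fun p => (PySem.Int.floordiv p.1 k + sur) * p.2)).sum = sur * xs.sum := by
  intro xs
  induction xs with
  | nil => intro s _ _; simp [PySem.List.enumerate_nil]
  | cons x xs ih =>
    intro s hs hle
    simp only [PySem.List.enumerate_cons, List.map_cons, List.sum_cons]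
    rw [ih (s + 1) (by omega) (by simp at hle ⊢; omega)]
    have h0 : PySem.Int.floordiv s k = 0 := by
      rw [PySem.Int.floordiv_eq_ediv_of_pos hk]
      exact Int.ediv_eq_zero_of_lt hs (by simp at hle; omega)
    rw [h0]; simp; ring

-- shifting the start index by k adds 1 to every multiplier
lemma pv_mapShift (k sur : Int) (hk : 0 < k) :
    ∀ (xs : List Int) (s : Int),
      ((PySem.List.enumerate xs (s + k)).map
        (fun p => (PySem.Int.floordiv p.1 k + sur) * p.2)).sum
      = ((PySem.List.enumerate xs s).map
        (fun p => (PySem.Int.floordiv p.1 k + (sur + 1)) * p.2)).sum := by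
  intro xs
  induction xs with
  | nil => intro s; simp [PySem.List.enumerate_nil]
  | cons x xs ih =>
    intro s
    simp only [PySem.List.enumerate_cons, List.map_cons, List.sum_cons]
    have : s + k + 1 = (s + 1) + k := by ring
    rw [this, ih (s + 1)]
    have hdiv : PySem.Int.floordiv (s + k) k = PySem.Int.floordiv s k + 1 := by
      rw [PySem.Int.floordiv_eq_ediv_of_pos hk, PySem.Int.floordiv_eq_ediv_of_pos hk]
      have := Int.add_mul_ediv_right s 1 (by omega : k ≠ 0)
      simpa using this
    rw [hdiv]; ring_nf

-- the loop computes pay + Σ (i//k + sur) * cost[i]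
lemma pv_loopEq (k : Int) (hk : 0 < k) :
    ∀ (fuel : Nat) (cost : List Int) (sur pay : Int), 1 ≤ sur → cost.length ≤ fuel →
      pvALoop k fuel sur pay cost
      = pay + ((PySem.List.enumerate cost 0).map
          (fun p => (PySem.Int.floordiv p.1 k + sur) * p.2)).sum := by
  intro fuel
  induction fuel with
  | zero =>
    intro cost sur pay _ hlen
    have : cost = [] := List.eq_nil_of_length_eq_zero (by omega)
    subst this; simp [pvALoop, PySem.List.enumerate_nil]
  | succ m ih =>
    intro cost sur pay hsur hlen
    by_cases hnil : cost = []
    · subst hnil; simp [pvALoop, PySem.List.enumerate_nil]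
    · rw [pvALoop, if_neg hnil]
      rw [PySem.List.slice_to cost hk.le, PySem.List.slice_from cost hk.le]
      have hdroplen : (cost.drop k.toNat).length ≤ m := by
        simp [List.length_drop]
        have : 0 < cost.length := List.length_pos_iff.mpr hnil
        have : 0 < k.toNat := by omega
        omega
      rw [ih _ (sur + 1) _ (by omega) hdroplen]
      rw [pv_repSum]
      rw [Int.toNat_of_nonneg (by omega : (0:Int) ≤ sur)]
      -- split the enumerate sum at index k
      conv_rhs => rw [← List.take_append_drop k.toNat cost]
      rw [PySem.List.enumerate_append, List.map_append, List.sum_append]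
      have htk : ((cost.take k.toNat).length : Int) ≤ k := by
        rw [List.length_take]; omega
      rw [pv_sumSmall k sur hk (cost.take k.toNat) 0 le_rfl (by simpa using htk)]
      by_cases hrest : cost.drop k.toNat = []
      · rw [hrest]; simp [PySem.List.enumerate_nil]
      · have hklen : k.toNat < cost.length := by
          by_contra h
          exact hrest (List.drop_eq_nil_of_le (by omega))
        have hlentake : ((cost.take k.toNat).length : Int) = k := by
          rw [List.length_take]; omega
        have h0k : (0 : Int) + ((cost.take k.toNat).length : Int) = 0 + k := by rw [hlentake]
        rw [h0k, pv_mapShift k sur hk (cost.drop k.toNat) 0]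
        ring

-- ===== VERDICT (by name: the statement is the Claim_ definition above) =====
theorem getMinimumCost_spec : Claim_equal_getMinimumCost := by
  intro k c _ hpre
  unfold Spec_getMinimumCost getMinimumCost getMinimumCost_alt
  have hperm : (PySem.List.sorted c (fun x => x) true).Perm c :=
    PySem.List.sorted_perm c _ _
  rcases hpre with hk | hnil
  · have hkpos : (0 : Int) < k := by omega
    by_cases hbig : k ≥ (c.length : Int)
    · rw [if_pos hbig]
      by_cases hsnil : PySem.List.sorted c (fun x => x) true = []
      · rw [if_pos hsnil]
        have hlen := hperm.length_eq
        rw [hsnil] at hlen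
        have : c = [] := List.eq_nil_of_length_eq_zero (by simpa using hlen.symm)
        simp [this]
      · rw [if_neg hsnil]
        rw [pv_sumSmall k 1 hkpos (PySem.List.sorted c (fun x => x) true) 0 le_rfl
            (by rw [hperm.length_eq]; omega)]
        rw [one_mul, hperm.sum_eq]
    · rw [if_neg hbig]
      have hsnil : PySem.List.sorted c (fun x => x) true ≠ [] := by
        intro h
        have hlen := hperm.length_eq
        rw [h] at hlen
        simp at hlen
        omega
      rw [if_neg hsnil]
      rw [pv_loopEq k hkpos _ _ 1 0 le_rfl le_rfl]
      ring
  · subst hnil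
    have h0 : PySem.List.sorted ([] : List Int) (fun x => x) true = [] :=
      (PySem.List.sorted_perm ([] : List Int) (fun x => x) true).eq_nil
    rw [h0]
    simp [pvALoop]
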